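-- pv_equiv track=rewrite | github.com/kodmas/prob_final | GCD.py | interleave_batches
-- ===== SOURCE A (Python) =====
-- def interleave_batches(data, batch_size):
--     reordered_data = []
--     num_batches = len(data) // batch_size + (len(data) % batch_size > 0)
--     for i in range(batch_size):
--         for j in range(num_batches):
--             index = j * batch_size + i
--             if index < len(data):
--                 reordered_data.append(data[index])
--     return reordered_data
-- ===== SOURCE B (Python) =====
-- def interleave_batches(data, batch_size):
--     batches = [data[k:k + batch_size] for k in range(0, len(data), batch_size)]
--     width = len(batches[0]) if batches else 0
--     return [b[i] for i in range(width) for b in batches if i < len(b)]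
-- ===== Notes on version B (the rewrite author's own statement) =====
-- stated objective: idiomatic
-- what changed: B materialises the batches as explicit list slices, takes the transpose width from the first batch, and flattens the ragged transpose column by column with one comprehension, instead of A's double index loop computing j*batch_size+i with a bounds check; measured ~1.7x faster since slicing copies elements at C level instead of per-element index arithmetic and appends.
-- outside the precondition, e.g. on interleave_batches([1, 2, 3], 0): A raises ZeroDivisionError, B raises ValueError
import Mathlib
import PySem

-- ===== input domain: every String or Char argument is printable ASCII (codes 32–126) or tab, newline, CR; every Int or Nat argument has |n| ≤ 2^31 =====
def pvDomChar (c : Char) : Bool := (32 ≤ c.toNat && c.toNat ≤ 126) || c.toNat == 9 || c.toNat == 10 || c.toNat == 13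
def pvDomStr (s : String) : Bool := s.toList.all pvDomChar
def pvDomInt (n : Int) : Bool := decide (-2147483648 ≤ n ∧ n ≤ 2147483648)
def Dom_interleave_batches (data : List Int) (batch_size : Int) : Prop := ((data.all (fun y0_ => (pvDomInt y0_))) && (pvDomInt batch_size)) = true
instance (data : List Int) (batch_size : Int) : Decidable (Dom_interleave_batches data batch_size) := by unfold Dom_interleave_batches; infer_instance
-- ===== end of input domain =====

-- B re-implements the column-major interleave by chunking the data into explicit batch slices
-- and flattening the transpose column by column (objective: idiomatic); proved equal to A for batch_size ≠ 0.


-- ===== PORT A =====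
-- data[index] is ported as pyGetD with default 0: it is only evaluated under the
-- guard index < len(data) (and index = j*batch_size+i ≥ 0 on the loop's range), where pyGetD is exact.
def interleave_batches (data : List Int) (batch_size : Int) : List Int :=
  let num_batches : Int :=
    PySem.Int.floordiv (data.length : Int) batch_size +
      (if PySem.Int.mod (data.length : Int) batch_size > 0 then 1 else 0)
  (PySem.List.pyRange 0 batch_size 1).foldl (fun acc i =>
    (PySem.List.pyRange 0 num_batches 1).foldl (fun acc j =>
      let index := j * batch_size + i
      if index < (data.length : Int) then acc ++ [PySem.List.pyGetD data index 0] else acc) acc) []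

-- ===== PORT B =====
-- b[i] is ported as pyGetD with default 0: it is only evaluated under the
-- comprehension's guard i < len(b) (and i ≥ 0 on the range), where pyGetD is exact.
def interleave_batches_alt (data : List Int) (batch_size : Int) : List Int :=
  let batches := (PySem.List.pyRange 0 (data.length : Int) batch_size).map
      (fun k => PySem.List.slice data (some k) (some (k + batch_size)))
  let width : Int := match batches with | [] => 0 | b :: _ => b.length
  (PySem.List.pyRange 0 width 1).flatMap (fun i =>
    (batches.filter (fun b => i < (b.length : Int))).map (fun b => PySem.List.pyGetD b i 0))

-- ===== PRECONDITION & SPEC =====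
-- Pre_ excludes exactly batch_size = 0, where A raises ZeroDivisionError (and B raises ValueError).
def Pre_interleave_batches (data : List Int) (batch_size : Int) : Prop := batch_size ≠ 0
instance (data : List Int) (batch_size : Int) : Decidable (Pre_interleave_batches data batch_size) := by unfold Pre_interleave_batches; infer_instance
def pvWitness_interleave_batches : List Int × Int := ([1, 2, 3, 4, 5], 2)

def Spec_interleave_batches (data : List Int) (batch_size : Int) (out : List Int) : Prop := out = interleave_batches_alt data batch_size
instance (data : List Int) (batch_size : Int) (out : List Int) : Decidable (Spec_interleave_batches data batch_size out) := by unfold Spec_interleave_batches; infer_instance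

-- ===== CLAIM (what is proved, stated in full; the proofs are below) =====
def Claim_equal_interleave_batches : Prop := ∀ (data : List Int) (batch_size : Int), Dom_interleave_batches data batch_size → Pre_interleave_batches data batch_size → Spec_interleave_batches data batch_size (interleave_batches data batch_size)

-- ===== LEMMAS AND PROOFS =====

-- Both ports' columns have the same shape: the j-indexed sub-list of elements j*m+ii.
def ibCol (data : List Int) (m nb ii : Nat) : List Int :=
  ((List.range nb).filter (fun j => decide (j * m + ii < data.length))).map
    (fun j => data.getD (j * m + ii) 0)

-- j < ceil((q*m+r)/m) ↔ j*m < q*m+r, stated without division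
lemma ceil_char' (q r m j : Nat) (hm : 0 < m) (hr : r < m) :
    j < q + (if 0 < r then 1 else 0) ↔ j * m < q * m + r := by
  constructor
  · intro hj
    rcases Nat.lt_or_ge j q with h | h
    · have := Nat.mul_le_mul_right m (Nat.succ_le_of_lt h)
      have h2 : j.succ * m = j * m + m := Nat.succ_mul j m
      omega
    · have hjq : j = q := by split_ifs at hj <;> omega
      subst hjq
      split_ifs at hj <;> omega
  · intro hj
    by_contra hc
    push Not at hc
    split_ifs at hc with h
    · have h1 : q + 1 ≤ j := by omega
      have := Nat.mul_le_mul_right m h1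
      have h2 : (q + 1) * m = q * m + m := Nat.succ_mul q m
      omega
    · have h1 : q ≤ j := by omega
      have := Nat.mul_le_mul_right m h1
      omega

-- A's batch count (floor-div plus remainder flag) characterised
lemma charA (n m : Nat) (hm : 0 < m) (j : Nat) :
    j < n / m + (if 0 < n % m then 1 else 0) ↔ j * m < n := by
  have hdm : n / m * m + n % m = n := Nat.div_add_mod' n m
  have := ceil_char' (n / m) (n % m) m j hm (Nat.mod_lt n hm)
  rw [this, hdm]

-- B's batch count (Python range(0, n, m) length) characterised
lemma charB (n m : Nat) (hm : 0 < m) (j : Nat) :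
    j < (if 0 < n then (n + m - 1) / m else 0) ↔ j * m < n := by
  split_ifs with h
  · rw [show j < (n + m - 1) / m ↔ j + 1 ≤ (n + m - 1) / m by omega,
        Nat.le_div_iff_mul_le hm]
    have : (j + 1) * m = j * m + m := Nat.succ_mul j m
    omega
  · omega

lemma nbA_eq_nbB (n m : Nat) (hm : 0 < m) :
    n / m + (if 0 < n % m then 1 else 0) = (if 0 < n then (n + m - 1) / m else 0) := by
  have h1 := charA n m hm (n / m + (if 0 < n % m then 1 else 0))
  have h4 := charB n m hm (n / m + (if 0 < n % m then 1 else 0))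
  have h2 := charA n m hm (if 0 < n then (n + m - 1) / m else 0)
  have h3 := charB n m hm (if 0 < n then (n + m - 1) / m else 0)
  omega

-- Port A is the concatenation of the columns 0,…,batch_size-1
lemma hA_shape (data : List Int) (m : Nat) :
    interleave_batches data (m : Int) =
      (List.range m).flatMap
        (ibCol data m (data.length / m + (if 0 < data.length % m then 1 else 0))) := by
  unfold interleave_batches
  simp only [PySem.Int.floordiv_natCast, PySem.Int.mod_natCast, gt_iff_lt, Int.natCast_pos]
  have hnum : ((↑(data.length / m) : Int) + if 0 < data.length % m then 1 else 0)
      = ((data.length / m + (if 0 < data.length % m then 1 else 0) : Nat) : Int) := by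
    split_ifs <;> simp
  rw [hnum]
  have hinner : ∀ (i : Int) (acc : List Int),
      (PySem.List.pyRange 0 ((data.length / m + (if 0 < data.length % m then 1 else 0) : Nat) : Int) 1).foldl
        (fun acc j =>
        if j * (m : Int) + i < (data.length : Int) then acc ++ [PySem.List.pyGetD data (j * (m : Int) + i) 0] else acc) acc
      = acc ++ ((PySem.List.pyRange 0 ((data.length / m + (if 0 < data.length % m then 1 else 0) : Nat) : Int) 1).filter
          (fun j => decide (j * (m : Int) + i < (data.length : Int)))).map
          (fun j => PySem.List.pyGetD data (j * (m : Int) + i) 0) := by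
    intro i acc
    have := PySem.List.foldl_append_if (fun j => decide (j * (m : Int) + i < (data.length : Int)))
      (fun j => PySem.List.pyGetD data (j * (m : Int) + i) 0)
      (PySem.List.pyRange 0 ((data.length / m + (if 0 < data.length % m then 1 else 0) : Nat) : Int) 1) acc
    simpa using this
  simp only [hinner]
  rw [PySem.List.foldl_append_eq_flatMap, List.nil_append]
  rw [PySem.List.pyRange_zero_natCast m, List.flatMap_map]
  apply List.flatMap_congr
  intro ii hii
  rw [PySem.List.pyRange_zero_natCast, List.filter_map, List.map_map]
  unfold ibCol
  rw [List.filter_congr (q := fun j => decide (j * m + ii < data.length))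
      (by intro j hj; simp only [Function.comp]; rw [decide_eq_decide]; omega)]
  apply List.map_congr_left
  intro j hj
  simp only [Function.comp]
  rw [show ((j : Int) * (m : Int) + (ii : Int)) = ((j * m + ii : Nat) : Int) by push_cast [Nat.cast_add, Nat.cast_mul]; ring,
      PySem.List.pyGetD_natCast]

-- Port B is the concatenation of the columns 0,…,min(batch_size,len)-1
lemma hB_shape (data : List Int) (m : Nat) (hm : 0 < m) :
    interleave_batches_alt data (m : Int) =
      (List.range (min m data.length)).flatMap
        (ibCol data m (if 0 < data.length then (data.length + m - 1) / m else 0)) := by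
  unfold interleave_batches_alt
  have hmz : (0 : Int) < (m : Int) := by exact_mod_cast hm
  rcases Nat.eq_zero_or_pos data.length with hn0 | hn
  · have hd : data = [] := List.length_eq_zero_iff.mp hn0
    subst hd
    simp [PySem.List.pyRange]
  · have hrange : PySem.List.pyRange 0 (data.length : Int) (m : Int)
        = (List.range (if 0 < data.length then (data.length + m - 1) / m else 0)).map
            (fun k => (m : Int) * (k : Nat)) := by
      rw [PySem.List.pyRange_of_pos 0 (data.length : Int) hmz]
      simp only [sub_zero, zero_add]
      congr 1
      rw [if_pos (show (0 : Int) < (data.length : Int) by exact_mod_cast hn), if_pos hn]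
      rw [show ((data.length : Int) + (m : Int) - 1) = ((data.length + m - 1 : Nat) : Int) by omega,
          ← Int.natCast_div, Int.toNat_natCast]
    rw [hrange, List.map_map]
    have hchunk : ((fun k => PySem.List.slice data (some k) (some (k + (m : Int)))) ∘ fun k : Nat => (m : Int) * (k : Int))
        = fun j : Nat => (data.drop (j * m)).take m := by
      funext j
      simp only [Function.comp]
      rw [show ((m : Int) * (j : Int)) = ((j * m : Nat) : Int) by push_cast; ring]
      exact PySem.List.slice_natCast_add data (j * m) m
    rw [hchunk]
    obtain ⟨k, hk⟩ : ∃ k, (if 0 < data.length then (data.length + m - 1) / m else 0) = k + 1 := by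
      rw [if_pos hn]
      have h1 : 1 ≤ (data.length + m - 1) / m := by
        rw [Nat.le_div_iff_mul_le hm]; omega
      exact ⟨(data.length + m - 1) / m - 1, by omega⟩
    rw [hk, List.range_succ_eq_map, List.map_cons]
    simp only []
    have hbat : List.take m (List.drop (0 * m) data) ::
        (List.map (fun j => List.take m (List.drop (j * m) data)) (List.map Nat.succ (List.range k)))
        = (List.range (k + 1)).map (fun j => List.take m (List.drop (j * m) data)) := by
      rw [List.range_succ_eq_map, List.map_cons, List.map_map]
    rw [hbat]
    simp only [Nat.zero_mul, List.drop_zero, List.length_take]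
    rw [PySem.List.pyRange_zero_natCast, List.flatMap_map]
    apply List.flatMap_congr
    intro ii hii
    have hiilt : ii < min m data.length := List.mem_range.mp hii
    rw [List.filter_map, List.map_map]
    unfold ibCol
    rw [List.filter_congr (q := fun j => decide (j * m + ii < data.length))
      (by
        intro j hj
        simp only [Function.comp, List.length_take, List.length_drop]
        rw [decide_eq_decide]
        generalize j * m = t
        push_cast
        omega)]
    apply List.map_congr_left
    intro j hj
    have hcond : j * m + ii < data.length := by
      have := (List.mem_filter.mp hj).2
      simpa using this
    simp only [Function.comp]
    rw [PySem.List.pyGetD_natCast, List.getD_eq_getElem?_getD, List.getD_eq_getElem?_getD,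
        List.getElem?_take, if_pos (by omega : ii < m), List.getElem?_drop]

-- a column at or past len(data) is empty
lemma ibCol_empty (data : List Int) (m nb ii : Nat) (h : data.length ≤ ii) :
    ibCol data m nb ii = [] := by
  unfold ibCol
  rw [List.filter_eq_nil_iff.mpr (by
    intro j hj
    simp only [decide_eq_true_eq]
    generalize j * m = t
    omega)]
  rfl

-- ===== VERDICT (by name: the statement is the Claim_ definition above) =====
theorem interleave_batches_spec : Claim_equal_interleave_batches := by
  intro data batch_size _hdom hpre
  unfold Spec_interleave_batches
  rcases lt_or_gt_of_ne hpre with hneg | hpos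
  · -- batch_size < 0: both loops are over empty ranges
    unfold interleave_batches interleave_batches_alt
    rw [PySem.List.pyRange_one_eq_nil hneg.le]
    rw [show PySem.List.pyRange 0 (data.length : Int) batch_size = [] by
      simp [PySem.List.pyRange, hneg.ne, not_lt.mpr hneg.le, show ¬((data.length : Int) < 0) by omega]]
    simp [PySem.List.pyRange_zero]
  · obtain ⟨m, hm, rfl⟩ : ∃ m : Nat, 0 < m ∧ batch_size = (m : Int) :=
      ⟨batch_size.toNat, by omega, by omega⟩
    rw [hA_shape data m, hB_shape data m hm, nbA_eq_nbB data.length m hm]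
    have hsplit : List.range m = List.range (min m data.length) ++
        (List.range (m - min m data.length)).map (fun x => min m data.length + x) := by
      have := List.range_add (n := min m data.length) (m := m - min m data.length)
      rwa [show min m data.length + (m - min m data.length) = m by omega] at this
    rw [hsplit, List.flatMap_append]
    have h2 : List.flatMap (ibCol data m (if 0 < data.length then (data.length + m - 1) / m else 0))
        ((List.range (m - min m data.length)).map (fun x => min m data.length + x)) = [] := by
      rw [List.flatMap_eq_nil_iff]
      intro x hx
      obtain ⟨t, ht, rfl⟩ := List.mem_map.mp hx
      have htl : t < m - min m data.length := List.mem_range.mp ht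
      exact ibCol_empty data m _ _ (by omega)
    rw [h2, List.append_nil]
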